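-- pv_equiv track=rewrite | github.com/eugenebireta/biretos-automation | scripts/rescue_tiny_photos.py | _channel_yield
-- ===== SOURCE A (Python) =====
-- def _channel_yield(outcomes: list[dict]) -> dict:
--     from collections import defaultdict
--     by_channel: dict[str, list[str]] = defaultdict(list)
--     for oc in outcomes:
--         ch = oc.get("channel_used") or "none"
--         by_channel[ch].append(oc["outcome"])
--     return {
--         ch: {
--             "total": len(codes),
--             "rescued": sum(1 for c in codes if c in ("rescued_good", "rescued_but_small")),
--         }
--         for ch, codes in sorted(by_channel.items())
--     }
-- ===== SOURCE B (Python) =====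
-- def _channel_yield(outcomes: list[dict]) -> dict:
--     channels = sorted({oc.get("channel_used") or "none" for oc in outcomes})
--     result = {}
--     for ch in channels:
--         total = 0
--         rescued = 0
--         for oc in outcomes:
--             if (oc.get("channel_used") or "none") == ch:
--                 total += 1
--                 if oc["outcome"] in ("rescued_good", "rescued_but_small"):
--                     rescued += 1
--         result[ch] = {"total": total, "rescued": rescued}
--     return result
-- ===== Notes on version B (the rewrite author's own statement) =====
-- stated objective: alternative
-- what changed: B drops A's grouping dict entirely: it first computes the sorted set of distinct channels, then for each channel makes one counting scan over the outcomes, maintaining integer total/rescued counters instead of per-channel lists of codes.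
import Mathlib
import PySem

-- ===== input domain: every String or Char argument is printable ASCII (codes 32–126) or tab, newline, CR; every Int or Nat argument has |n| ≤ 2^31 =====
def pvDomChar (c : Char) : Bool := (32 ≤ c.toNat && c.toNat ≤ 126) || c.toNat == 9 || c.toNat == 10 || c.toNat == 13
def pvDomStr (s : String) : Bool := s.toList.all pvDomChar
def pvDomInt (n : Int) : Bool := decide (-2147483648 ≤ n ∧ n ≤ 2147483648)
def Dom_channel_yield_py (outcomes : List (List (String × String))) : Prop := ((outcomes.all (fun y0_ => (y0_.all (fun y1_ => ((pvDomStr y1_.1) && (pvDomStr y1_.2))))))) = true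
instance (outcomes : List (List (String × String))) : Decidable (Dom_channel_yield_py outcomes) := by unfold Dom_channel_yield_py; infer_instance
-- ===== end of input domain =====

-- B drops A's grouping dict: it sorts the set of distinct channels first and then counts
-- total/rescued for each channel by a dedicated scan over the outcomes (objective: alternative).

-- ===== PORT A =====
-- `sorted(by_channel.items())` compares (str, list[str]) tuples; the keys of a dict are
-- distinct, so the comparison never reaches the second component and sorting by the key
-- (·.1) is exact.
def channel_yield_py (outcomes : List (List (String × String))) : List (String × List (String × Int)) :=
  let by_channel : PySem.Dict String (List String) :=
    outcomes.foldl (fun d oc =>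
      let ch := match (PySem.Dict.mk oc).get? "channel_used" with
        | none => "none"
        | some s => if s == "" then "none" else s
      -- oc["outcome"]: get? = none is a KeyError, excluded by Pre_; the default "" is unreachable there
      d.modify ch [] (fun codes => codes ++ [((PySem.Dict.mk oc).get? "outcome").getD ""]))
      PySem.Dict.empty
  (PySem.List.sorted by_channel.items (fun p => p.1) false).map
    (fun p => (p.1,
      [("total", (p.2.length : Int)),
       ("rescued", p.2.foldl (fun acc c =>
          if c == "rescued_good" || c == "rescued_but_small" then acc + 1 else acc) (0 : Int))]))

-- ===== PORT B =====
-- (oc.get("channel_used") or "none"), as B computes it in both of its loops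
def pvChB (oc : List (String × String)) : String :=
  match (PySem.Dict.mk oc).get? "channel_used" with
  | none => "none"
  | some s => if s == "" then "none" else s

-- B's inner counting scan for one channel: (total, rescued).
-- oc["outcome"]: get? = none is a KeyError, excluded by Pre_; the default "" is unreachable there
def pvCountB (outcomes : List (List (String × String))) (ch : String) : Int × Int :=
  outcomes.foldl (fun tr oc =>
    if pvChB oc == ch then
      (tr.1 + 1,
       tr.2 + (if ((PySem.Dict.mk oc).get? "outcome").getD "" == "rescued_good"
                  || ((PySem.Dict.mk oc).get? "outcome").getD "" == "rescued_but_small"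
               then 1 else 0))
    else tr) ((0 : Int), (0 : Int))

def channel_yield_py_alt (outcomes : List (List (String × String))) : List (String × List (String × Int)) :=
  let channels := PySem.List.sorted (PySem.Set.ofList (outcomes.map pvChB)) (fun x => x) false
  (channels.foldl (fun (res : PySem.Dict String (List (String × Int))) ch =>
      let tr := pvCountB outcomes ch
      res.insert ch [("total", tr.1), ("rescued", tr.2)]) PySem.Dict.empty).items

-- ===== PRECONDITION & SPEC =====
-- Pre_ excludes exactly the inputs where oc["outcome"] raises KeyError in A (and in B).
def Pre_channel_yield_py (outcomes : List (List (String × String))) : Prop :=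
  ∀ oc ∈ outcomes, ((PySem.Dict.mk oc).get? "outcome").isSome = true
instance (outcomes : List (List (String × String))) : Decidable (Pre_channel_yield_py outcomes) := by unfold Pre_channel_yield_py; infer_instance
def pvWitness_channel_yield_py : (List (List (String × String))) :=
  [[("outcome", "rescued_good"), ("channel_used", "tg")], [("outcome", "failed")]]

def Spec_channel_yield_py (outcomes : List (List (String × String))) (out : List (String × List (String × Int))) : Prop := out = channel_yield_py_alt outcomes
instance (outcomes : List (List (String × String))) (out : List (String × List (String × Int))) : Decidable (Spec_channel_yield_py outcomes out) := by unfold Spec_channel_yield_py; infer_instance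

-- ===== CLAIM (what is proved, stated in full; the proofs are below) =====
def Claim_equal_channel_yield_py : Prop := ∀ (outcomes : List (List (String × String))), Dom_channel_yield_py outcomes → Pre_channel_yield_py outcomes → Spec_channel_yield_py outcomes (channel_yield_py outcomes)

-- ===== LEMMAS AND PROOFS =====

def pvOut (oc : List (String × String)) : String :=
  ((PySem.Dict.mk oc).get? "outcome").getD ""

def pvResc (oc : List (String × String)) : Bool :=
  pvOut oc == "rescued_good" || pvOut oc == "rescued_but_small"

-- A's grouping dict, with the projected (key, code) pairs pulled out of the loop
def pvL1 (outcomes : List (List (String × String))) : List (String × String) :=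
  outcomes.map (fun oc => (pvChB oc, pvOut oc))

def pvDA (outcomes : List (List (String × String))) : PySem.Dict String (List String) :=
  (pvL1 outcomes).foldl (fun d p => d.modify p.1 [] (fun codes => codes ++ [p.2])) PySem.Dict.empty

theorem pv_A_eq (outcomes : List (List (String × String))) :
    channel_yield_py outcomes =
      (PySem.List.sorted (pvDA outcomes).items (fun p => p.1) false).map
        (fun p => (p.1,
          [("total", (p.2.length : Int)),
           ("rescued", p.2.foldl (fun acc c =>
              if c == "rescued_good" || c == "rescued_but_small" then acc + 1 else acc) (0 : Int))])) := by
  simp only [channel_yield_py, pvDA, pvL1]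
  rw [List.foldl_map]
  rfl

theorem pv_keysA (outcomes : List (List (String × String))) :
    (pvDA outcomes).keys = PySem.Set.ofList (outcomes.map pvChB) := by
  simp only [pvDA]
  rw [PySem.Dict.keys_foldl_modify_key (pvL1 outcomes) (fun p => p.1) [] (fun _ p => (fun codes => codes ++ [p.2]))]
  simp only [pvL1, List.map_map, Function.comp_def]
  rfl

theorem pv_nodupA (outcomes : List (List (String × String))) : (pvDA outcomes).keys.Nodup := by
  simp only [pvDA]
  exact PySem.Dict.nodup_keys_foldl_modify_key (pvL1 outcomes) (fun p => p.1) []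
    (fun _ p => fun codes => codes ++ [p.2]) PySem.Dict.empty PySem.Dict.nodup_keys_empty

theorem pv_sorted_items {ν : Type} (d : PySem.Dict String ν) (hnd : d.keys.Nodup) (dflt : ν) :
    PySem.List.sorted d.items (fun p => p.1) false =
      (PySem.List.sorted d.keys (fun x => x) false).map (fun k => (k, d.getD k dflt)) := by
  apply PySem.List.sorted_eq_of_perm_of_pairwise_lt
  · rw [PySem.Dict.items_eq_map_keys d hnd dflt]
    exact (PySem.List.sorted_perm d.keys (fun x => x) false).map _
  · rw [List.pairwise_map]
    have hle := PySem.List.sorted_pairwise d.keys (fun x => x)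
    have hnd' : (PySem.List.sorted d.keys (fun x => x) false).Nodup :=
      ((PySem.List.sorted_perm d.keys (fun x => x) false).nodup_iff).mpr hnd
    exact (hle.and hnd').imp (fun h => lt_of_le_of_ne h.1 h.2)

-- B's downward pass: the loop over sorted fresh keys builds its dict items by appending
theorem pv_B_eq (outcomes : List (List (String × String))) :
    channel_yield_py_alt outcomes =
      (PySem.List.sorted (PySem.Set.ofList (outcomes.map pvChB)) (fun x => x) false).map
        (fun ch => (ch, [("total", (pvCountB outcomes ch).1), ("rescued", (pvCountB outcomes ch).2)])) := by
  simp only [channel_yield_py_alt]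
  rw [PySem.Dict.items_foldl_insert_fresh
    (l := PySem.List.sorted (PySem.Set.ofList (outcomes.map pvChB)) (fun x => x) false)
    (k := fun ch => ch)
    (v := fun ch => [("total", (pvCountB outcomes ch).1), ("rescued", (pvCountB outcomes ch).2)])
    (d := PySem.Dict.empty)
    (fun a _ => PySem.Dict.contains_empty a)
    (by
      simpa using (PySem.List.sorted_perm (PySem.Set.ofList (outcomes.map pvChB))
        (fun x => x) false).nodup_iff.mpr (PySem.Set.nodup_ofList _))]
  simp [PySem.Dict.empty]

-- B's counting scan as two countPs
theorem pv_countB (outcomes : List (List (String × String))) (ch : String) :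
    pvCountB outcomes ch =
      ((outcomes.countP (fun oc => pvChB oc == ch) : Int),
       (outcomes.countP (fun oc => pvChB oc == ch && pvResc oc) : Int)) := by
  simp only [pvCountB, pvResc, pvOut]
  suffices h : ∀ (l : List (List (String × String))) (tr : Int × Int),
      l.foldl (fun tr oc =>
        if pvChB oc == ch then
          (tr.1 + 1,
           tr.2 + (if ((PySem.Dict.mk oc).get? "outcome").getD "" == "rescued_good"
                      || ((PySem.Dict.mk oc).get? "outcome").getD "" == "rescued_but_small"
                   then 1 else 0))
        else tr) tr
      = (tr.1 + (l.countP (fun oc => pvChB oc == ch) : Int),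
         tr.2 + (l.countP (fun oc => pvChB oc == ch
            && (((PySem.Dict.mk oc).get? "outcome").getD "" == "rescued_good"
             || ((PySem.Dict.mk oc).get? "outcome").getD "" == "rescued_but_small")) : Int)) by
    simpa using h outcomes (0, 0)
  intro l
  induction l with
  | nil => simp
  | cons oc l ih =>
    intro tr
    rw [List.foldl_cons, ih, List.countP_cons, List.countP_cons]
    by_cases hch : (pvChB oc == ch) = true
    · by_cases hr : (((PySem.Dict.mk oc).get? "outcome").getD "" == "rescued_good"
             || ((PySem.Dict.mk oc).get? "outcome").getD "" == "rescued_but_small") = true <;>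
        · simp only [hch, hr, if_true, Bool.and_false, Bool.and_true, Prod.mk.injEq]
          constructor <;> push_cast <;> ring
    · have hch' : (pvChB oc == ch) = false := Bool.eq_false_iff.mpr hch
      simp [hch']

theorem pv_main (outcomes : List (List (String × String))) :
    channel_yield_py outcomes = channel_yield_py_alt outcomes := by
  rw [pv_A_eq, pv_B_eq,
      pv_sorted_items (pvDA outcomes) (pv_nodupA outcomes) [],
      pv_keysA, List.map_map]
  apply List.map_congr_left
  intro k _
  simp only [Function.comp, pvDA, pv_countB]
  rw [PySem.Dict.getD_foldl_modify_append, PySem.Dict.getD_empty]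
  simp only [pvL1, List.filter_map, List.map_map,
    PySem.List.foldl_if_add_one, Function.comp_def, List.nil_append,
    List.length_map, List.countP_eq_length_filter, pvResc, zero_add]
  have hsw :
      List.filter (fun a => (pvOut a == "rescued_good" || pvOut a == "rescued_but_small")
          && (pvChB a == k)) outcomes
        = List.filter (fun a => (pvChB a == k)
          && (pvOut a == "rescued_good" || pvOut a == "rescued_but_small")) outcomes :=
    List.filter_congr (fun oc _ => by rw [Bool.and_comm])
  rw [List.filter_filter, hsw]

-- ===== VERDICT =====
theorem channel_yield_py_spec : Claim_equal_channel_yield_py := by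
  intro outcomes _ _
  exact pv_main outcomes
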